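-- pv_equiv track=rewrite | github.com/ThomasCrawford/AdventofCode | 2015/day_19.py | split_chemicals
-- ===== SOURCE A (Python) =====
-- def split_chemicals(compound):
--     elements = []
--     i = 0
--     while i < len(compound):
--         # If the next character exists and is lowercase, it's a two-letter element
--         if i + 1 < len(compound) and compound[i+1].islower():
--             elements.append(compound[i:i+2])
--             i += 2  # Skip the next character as it's part of the two-letter element
--         else:
--             elements.append(compound[i])
--             i += 1
--     return elements
-- ===== SOURCE B (Python) =====
-- def split_chemicals(compound):
--     tokens = []
--     buf = ""
--     for c in compound:
--         if c.islower() and buf: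
--             tokens.append(buf + c)
--             buf = ""
--         else:
--             if buf:
--                 tokens.append(buf)
--             buf = c
--     if buf:
--         tokens.append(buf)
--     return tokens
-- ===== Notes on version B (the rewrite author's own statement) =====
-- stated objective: alternative
-- what changed: Replaces the index loop with one-character lookahead and slicing by a single left-to-right pass over the characters that keeps a one-character pending buffer and flushes it when the next character is lowercase; no indexing or slicing at all.
import Mathlib
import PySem

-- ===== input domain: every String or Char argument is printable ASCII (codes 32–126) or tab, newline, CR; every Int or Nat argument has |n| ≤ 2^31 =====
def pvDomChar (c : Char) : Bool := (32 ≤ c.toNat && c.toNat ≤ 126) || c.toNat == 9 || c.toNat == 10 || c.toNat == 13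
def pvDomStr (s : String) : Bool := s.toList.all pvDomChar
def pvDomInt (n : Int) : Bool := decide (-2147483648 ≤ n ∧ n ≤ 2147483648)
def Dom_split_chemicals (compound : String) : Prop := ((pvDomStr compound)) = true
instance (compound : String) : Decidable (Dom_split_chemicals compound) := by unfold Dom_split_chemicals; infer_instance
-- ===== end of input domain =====

-- B replaces A's index loop with lookahead and slicing by a single buffered pass over the
-- characters (a fold with a one-character pending buffer); alternative decomposition, same cost.

-- ===== PORT A =====
-- while i < len(compound): if i+1 < len and compound[i+1].islower(): append compound[i:i+2]; i += 2
--                          else: append compound[i]; i += 1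
def pvALoop (s : List Char) (i : Nat) : List (List Char) :=
  if _h : i < s.length then
    if i + 1 < s.length ∧ PySem.Chars.islower (PySem.List.pyGetD s ((i : Int) + 1) ' ') then
      PySem.List.slice s (some (i : Int)) (some ((i : Int) + 2)) :: pvALoop s (i + 2)
    else
      [PySem.List.pyGetD s (i : Int) ' '] :: pvALoop s (i + 1)
  else []
termination_by s.length - i

def split_chemicals (compound : String) : List String :=
  (pvALoop compound.toList 0).map String.ofList

-- ===== PORT B =====
-- one step of B's for-loop over the characters: state = (tokens so far, pending buffer)
def pvBStep (st : List (List Char) × List Char) (c : Char) : List (List Char) × List Char :=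
  if PySem.Chars.islower c ∧ st.2 ≠ [] then (st.1 ++ [st.2 ++ [c]], [])
  else if st.2 ≠ [] then (st.1 ++ [st.2], [c])
  else (st.1, [c])

-- the final 'if buf: tokens.append(buf)' of B
def pvFinalize (st : List (List Char) × List Char) : List (List Char) :=
  if st.2 ≠ [] then st.1 ++ [st.2] else st.1

def split_chemicals_alt (compound : String) : List String :=
  (pvFinalize (compound.toList.foldl pvBStep ([], []))).map String.ofList

-- ===== PRECONDITION & SPEC =====
def Spec_split_chemicals (compound : String) (out : List String) : Prop := out = split_chemicals_alt compound
instance (compound : String) (out : List String) : Decidable (Spec_split_chemicals compound out) := by unfold Spec_split_chemicals; infer_instance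

-- ===== CLAIM (what is proved, stated in full; the proofs are below) =====
def Claim_equal_split_chemicals : Prop := ∀ (compound : String), Dom_split_chemicals compound → Spec_split_chemicals compound (split_chemicals compound)

-- ===== LEMMAS AND PROOFS =====

-- reference tokenization both ports are reduced to
def pvTok : List Char → List (List Char)
  | [] => []
  | [a] => [[a]]
  | a :: b :: rest =>
    if PySem.Chars.islower b then [a, b] :: pvTok rest else [a] :: pvTok (b :: rest)

lemma pvALoop_eq_pvTok (s : List Char) : ∀ n i, s.length - i ≤ n → pvALoop s i = pvTok (s.drop i) := by
  intro n
  induction n with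
  | zero =>
    intro i hi
    have hlen : s.length ≤ i := by omega
    rw [pvALoop, List.drop_eq_nil_of_le hlen]
    simp [pvTok, Nat.not_lt.mpr hlen]
  | succ n ih =>
    intro i hi
    rw [pvALoop]
    by_cases h : i < s.length
    · have hdrop : s.drop i = s[i] :: s.drop (i + 1) := List.drop_eq_getElem_cons h
      by_cases h1 : i + 1 < s.length
      · have hdrop1 : s.drop (i + 1) = s[i+1] :: s.drop (i + 2) := List.drop_eq_getElem_cons h1
        have hget : PySem.List.pyGetD s ((i : Int) + 1) ' ' = s[i+1] := by
          have : ((i : Int) + 1) = ((i + 1 : Nat) : Int) := by push_cast; ring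
          rw [this, PySem.List.pyGetD_natCast]
          simp [List.getD, List.getElem?_eq_getElem h1]
        by_cases hl : PySem.Chars.islower s[i+1]
        · have hslice : PySem.List.slice s (some (i : Int)) (some ((i : Int) + 2)) = [s[i], s[i+1]] := by
            have : ((i : Int) + 2) = ((i : Int) + ((2 : Nat) : Int)) := by push_cast; ring
            rw [this, PySem.List.slice_natCast_add, hdrop, hdrop1]
            rfl
          rw [dif_pos h, if_pos ⟨h1, by rw [hget]; exact hl⟩, hslice, hdrop, hdrop1, pvTok,
            if_pos hl, ih (i + 2) (by omega)]
        · rw [dif_pos h, if_neg (by rw [hget]; tauto), hdrop, hdrop1, pvTok, if_neg hl,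
            ← hdrop1, ih (i + 1) (by omega)]
          simp [PySem.List.pyGetD_natCast, List.getD, List.getElem?_eq_getElem h]
      · have hnil : s.drop (i + 1) = [] := List.drop_eq_nil_of_le (by omega)
        rw [dif_pos h, if_neg (by tauto), hdrop, hnil, pvTok, ih (i + 1) (by omega), hnil]
        simp [pvTok, PySem.List.pyGetD_natCast, List.getD, List.getElem?_eq_getElem h]
    · rw [dif_neg h, List.drop_eq_nil_of_le (by omega), pvTok]

lemma pvB_inv : ∀ n (l : List Char), l.length ≤ n → ∀ (a : Char) (toks : List (List Char)),
    pvFinalize (l.foldl pvBStep (toks, [a])) = toks ++ pvTok (a :: l) := by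
  intro n
  induction n with
  | zero =>
    intro l hl a toks
    have : l = [] := List.eq_nil_of_length_eq_zero (by omega)
    subst this
    simp [pvFinalize, pvTok]
  | succ n ih =>
    intro l hl a toks
    match l with
    | [] => simp [pvFinalize, pvTok]
    | b :: rest =>
      by_cases hb : PySem.Chars.islower b
      · have hstep : pvBStep (toks, [a]) b = (toks ++ [[a, b]], []) := by
          simp [pvBStep, hb]
        rw [List.foldl_cons, hstep, pvTok, if_pos hb]
        match rest with
        | [] => simp [pvFinalize, pvTok]
        | c :: rest' =>
          have hstep2 : pvBStep (toks ++ [[a, b]], []) c = (toks ++ [[a, b]], [c]) := by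
            simp [pvBStep]
          rw [List.foldl_cons, hstep2,
            ih rest' (by simp at hl ⊢; omega) c (toks ++ [[a, b]])]
          simp
      · have hstep : pvBStep (toks, [a]) b = (toks ++ [[a]], [b]) := by
          simp [pvBStep, hb]
        rw [List.foldl_cons, hstep, ih rest (by simp at hl; omega) b (toks ++ [[a]]),
          pvTok, if_neg hb]
        simp

lemma pv_main (s : List Char) : pvALoop s 0 = pvFinalize (s.foldl pvBStep ([], [])) := by
  rw [pvALoop_eq_pvTok s s.length 0 (by omega), List.drop_zero]
  match s with
  | [] => simp [pvFinalize, pvTok]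
  | a :: l =>
    have hstep : pvBStep (([] : List (List Char)), ([] : List Char)) a = ([], [a]) := by
      simp [pvBStep]
    rw [List.foldl_cons, hstep, pvB_inv l.length l (le_refl _) a []]
    simp

-- ===== VERDICT (by name: the statement is the Claim_ definition above) =====
theorem split_chemicals_spec : Claim_equal_split_chemicals := by
  intro compound _
  unfold Spec_split_chemicals split_chemicals split_chemicals_alt
  rw [pv_main]
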